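-- pv_equiv track=rewrite | github.com/wojcikania12/BOiKWD | Lab5/zad5_1.py | is_generalized_tourney
-- ===== SOURCE A (Python) =====
-- def is_generalized_tourney(matrix):
--     rows = len(matrix)
--     cols = len(matrix[0])
--     x = 0
--     result = ""
--     for i in range(rows):
--         for j in range(cols):
--             if (i != j and matrix[i][j] != -matrix[j][i]):
--                 result = "Macierz nieturniejowa. "
--                 return result
--             if(i != j and matrix[i][j] == 0):
--                 x = x + 1
--     if(result == ""):
--         result = "Macierz turniejowa. "
--     if(x):
--         result = result + " Uogólniona. Są remisy"
--     else:
--         result = result + " Nieuogólniona."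
--     return result
-- ===== SOURCE B (Python) =====
-- def is_generalized_tourney(matrix):
--     rows = len(matrix)
--     cols = len(matrix[0])
--     if any(matrix[i][j] != -matrix[j][i]
--            for i in range(rows) for j in range(cols) if i != j):
--         return "Macierz nieturniejowa. "
--     draws = any(matrix[i][j] == 0
--                 for i in range(rows) for j in range(cols) if i != j)
--     return "Macierz turniejowa. " + (" Uogólniona. Są remisy" if draws else " Nieuogólniona.")
-- ===== Notes on version B (the rewrite author's own statement) =====
-- stated objective: simpler
-- what changed: The single fused nested loop with an early return and a running zero-counter is split into two declarative passes: an any() antisymmetry check that rejects immediately, then an any() draws test, with the result string built in one expression.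
import Mathlib
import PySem

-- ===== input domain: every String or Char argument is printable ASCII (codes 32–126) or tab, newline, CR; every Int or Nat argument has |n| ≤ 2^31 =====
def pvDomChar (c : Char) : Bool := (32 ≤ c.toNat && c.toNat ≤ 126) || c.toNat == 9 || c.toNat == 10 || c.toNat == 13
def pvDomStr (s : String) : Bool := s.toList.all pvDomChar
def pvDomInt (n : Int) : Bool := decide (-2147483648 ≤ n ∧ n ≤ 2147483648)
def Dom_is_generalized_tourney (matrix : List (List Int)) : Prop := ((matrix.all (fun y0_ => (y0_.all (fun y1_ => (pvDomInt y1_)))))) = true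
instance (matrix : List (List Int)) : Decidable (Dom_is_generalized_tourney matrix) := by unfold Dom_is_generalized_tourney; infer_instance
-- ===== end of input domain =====

-- B splits A's fused early-return loop with a zero-counter into two separate any-passes
-- (antisymmetry check, then draws test); objective: simpler. Equivalence is on return values.

-- matrix[i][j]; exact within Pre_ (both indices produced by pyRange over the square shape, hence in range)
def pvMGet (m : List (List Int)) (i j : Int) : Int :=
  PySem.List.pyGetD (PySem.List.pyGetD m i []) j 0

-- ===== PORT A =====
-- inner 'for j in range(cols)' with the early return encoded as Sum.inl, x the zero-counter
def pvAInner (m : List (List Int)) (i : Int) (js : List Int) (x : Int) : Sum String Int :=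
  match js with
  | [] => Sum.inr x
  | j :: rest =>
    if i ≠ j ∧ pvMGet m i j ≠ -(pvMGet m j i) then Sum.inl "Macierz nieturniejowa. "
    else pvAInner m i rest (if i ≠ j ∧ pvMGet m i j = 0 then x + 1 else x)

-- outer 'for i in range(rows)'
def pvAOuter (m : List (List Int)) (js : List Int) (is_ : List Int) (x : Int) : Sum String Int :=
  match is_ with
  | [] => Sum.inr x
  | i :: rest =>
    match pvAInner m i js x with
    | Sum.inl r => Sum.inl r
    | Sum.inr x' => pvAOuter m js rest x'

-- the code after the loop: an early return passes through, else 'result' is still "" so it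
-- becomes "Macierz turniejowa. ", and 'if(x):' appends the draws suffix
def pvAFinish (r : Sum String Int) : String :=
  match r with
  | Sum.inl result => result
  | Sum.inr x =>
    let result := "Macierz turniejowa. "
    if x ≠ 0 then result ++ " Uogólniona. Są remisy" else result ++ " Nieuogólniona."

def is_generalized_tourney (matrix : List (List Int)) : String :=
  let rows : Int := matrix.length
  let cols : Int := (PySem.List.pyGetD matrix 0 []).length
  pvAFinish (pvAOuter matrix (PySem.List.pyRange 0 cols 1) (PySem.List.pyRange 0 rows 1) 0)

-- ===== PORT B =====
def is_generalized_tourney_alt (matrix : List (List Int)) : String :=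
  let rows : Int := matrix.length
  let cols : Int := (PySem.List.pyGetD matrix 0 []).length
  let is_ := PySem.List.pyRange 0 rows 1
  let js := PySem.List.pyRange 0 cols 1
  if is_.any (fun i => js.any (fun j =>
       decide (i ≠ j) && decide (pvMGet matrix i j ≠ -(pvMGet matrix j i)))) then
    "Macierz nieturniejowa. "
  else
    let draws := is_.any (fun i => js.any (fun j =>
       decide (i ≠ j) && decide (pvMGet matrix i j = 0)))
    "Macierz turniejowa. " ++ (if draws then " Uogólniona. Są remisy" else " Nieuogólniona.")

-- ===== PRECONDITION & SPEC =====
-- Pre_ is exactly the inputs on which Python A returns normally (elsewhere it raises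
-- IndexError): the matrix is nonempty and either every off-diagonal access of the scan is in
-- range, or the scan meets an antisymmetry violation (early return) before any out-of-range
-- access.  In-range access at (i,j): j < len(m[i]), j < len(m) and i < len(m[j]).
def Pre_is_generalized_tourney (matrix : List (List Int)) : Prop :=
  matrix ≠ [] ∧
    ((∀ i ∈ List.range matrix.length, ∀ j ∈ List.range (matrix.headD []).length, i ≠ j →
        j < (matrix.getD i []).length ∧ j < matrix.length ∧ i < (matrix.getD j []).length)
     ∨ ∃ i ∈ List.range matrix.length, ∃ j ∈ List.range (matrix.headD []).length,
         i ≠ j ∧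
         (j < (matrix.getD i []).length ∧ j < matrix.length ∧ i < (matrix.getD j []).length) ∧
         (matrix.getD i []).getD j 0 ≠ -((matrix.getD j []).getD i 0) ∧
         ∀ i' ∈ List.range matrix.length, ∀ j' ∈ List.range (matrix.headD []).length,
           (i' < i ∨ (i' = i ∧ j' < j)) → i' ≠ j' →
             (j' < (matrix.getD i' []).length ∧ j' < matrix.length ∧ i' < (matrix.getD j' []).length) ∧
             (matrix.getD i' []).getD j' 0 = -((matrix.getD j' []).getD i' 0))
instance (matrix : List (List Int)) : Decidable (Pre_is_generalized_tourney matrix) := by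
  unfold Pre_is_generalized_tourney; infer_instance
def pvWitness_is_generalized_tourney : List (List Int) := [[0, 1], [-1, 0]]

def Spec_is_generalized_tourney (matrix : List (List Int)) (out : String) : Prop := out = is_generalized_tourney_alt matrix
instance (matrix : List (List Int)) (out : String) : Decidable (Spec_is_generalized_tourney matrix out) := by unfold Spec_is_generalized_tourney; infer_instance

-- ===== CLAIM (what is proved, stated in full; the proofs are below) =====
def Claim_equal_is_generalized_tourney : Prop := ∀ (matrix : List (List Int)), Dom_is_generalized_tourney matrix → Pre_is_generalized_tourney matrix → Spec_is_generalized_tourney matrix (is_generalized_tourney matrix)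

-- ===== LEMMAS AND PROOFS =====

-- A's inner loop = (any violation in js → early return) else x + number of off-diagonal zeros in js
theorem pvAInner_eq (m : List (List Int)) (i : Int) (js : List Int) (x : Int) :
    pvAInner m i js x =
      if js.any (fun j => decide (i ≠ j) && decide (pvMGet m i j ≠ -(pvMGet m j i))) then
        Sum.inl "Macierz nieturniejowa. "
      else
        Sum.inr (x + (js.countP (fun j => decide (i ≠ j) && decide (pvMGet m i j = 0)) : Int)) := by
  induction js generalizing x with
  | nil => simp [pvAInner]
  | cons j rest ih =>
    by_cases hv : i ≠ j ∧ pvMGet m i j ≠ -(pvMGet m j i)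
    · have hb : (decide (i ≠ j) && decide (pvMGet m i j ≠ -(pvMGet m j i))) = true := by
        simp [hv.1, hv.2]
      rw [pvAInner, if_pos hv, List.any_cons, hb, Bool.true_or, if_pos rfl]
    · have hb : (decide (i ≠ j) && decide (pvMGet m i j ≠ -(pvMGet m j i))) = false := by
        rw [Bool.eq_false_iff]; intro hb; exact hv (by simpa using hb)
      by_cases hz : i ≠ j ∧ pvMGet m i j = 0
      · have hzb : (decide (i ≠ j) && decide (pvMGet m i j = 0)) = true := by
          simp [hz.1, hz.2]
        rw [pvAInner, if_neg hv, if_pos hz, ih, List.any_cons, hb, Bool.false_or,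
            List.countP_cons, hzb, if_pos rfl]
        split_ifs with h1
        · rfl
        · congr 1; push_cast; ring
      · have hzb : (decide (i ≠ j) && decide (pvMGet m i j = 0)) = false := by
          rw [Bool.eq_false_iff]; intro hb; exact hz (by simpa using hb)
        rw [pvAInner, if_neg hv, if_neg hz, ih, List.any_cons, hb, Bool.false_or,
            List.countP_cons, hzb, if_neg Bool.false_ne_true, Nat.add_zero]

-- A's outer loop in the same closed form
theorem pvAOuter_eq (m : List (List Int)) (js is_ : List Int) (x : Int) :
    pvAOuter m js is_ x =
      if is_.any (fun i => js.any (fun j => decide (i ≠ j) && decide (pvMGet m i j ≠ -(pvMGet m j i)))) then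
        Sum.inl "Macierz nieturniejowa. "
      else
        Sum.inr (x + ((is_.map (fun i => js.countP (fun j => decide (i ≠ j) && decide (pvMGet m i j = 0)))).sum : Int)) := by
  induction is_ generalizing x with
  | nil => simp [pvAOuter]
  | cons i rest ih =>
    by_cases hv : (js.any fun j => decide (i ≠ j) && decide (pvMGet m i j ≠ -(pvMGet m j i))) = true
    · have hA : pvAInner m i js x = Sum.inl "Macierz nieturniejowa. " := by
        rw [pvAInner_eq, if_pos hv]
      rw [pvAOuter, hA, List.any_cons, hv, Bool.true_or, if_pos rfl]
    · rw [Bool.not_eq_true] at hv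
      have hA : pvAInner m i js x =
          Sum.inr (x + (js.countP (fun j => decide (i ≠ j) && decide (pvMGet m i j = 0)) : Int)) := by
        rw [pvAInner_eq, if_neg (by rw [hv]; exact Bool.false_ne_true)]
      rw [pvAOuter, hA]
      show pvAOuter m js rest _ = _
      rw [ih, List.any_cons, hv, Bool.false_or, List.map_cons, List.sum_cons]
      split_ifs with h1
      · rfl
      · congr 1; push_cast; ring

-- a sum of per-row zero-counts is nonzero iff some row has an off-diagonal zero
theorem pvSum_ne_zero_iff (m : List (List Int)) (js is_ : List Int) :
    ((is_.map (fun i => js.countP (fun j => decide (i ≠ j) && decide (pvMGet m i j = 0)))).sum ≠ 0) ↔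
      (is_.any (fun i => js.any (fun j => decide (i ≠ j) && decide (pvMGet m i j = 0)))) = true := by
  rw [Ne, List.sum_eq_zero_iff]
  simp only [List.mem_map, List.any_eq_true, not_forall]
  constructor
  · rintro ⟨_, ⟨i, hi, rfl⟩, hc⟩
    rcases List.countP_pos_iff.mp (Nat.pos_of_ne_zero hc) with ⟨j, hj, hz⟩
    exact ⟨i, hi, j, hj, hz⟩
  · rintro ⟨i, hi, j, hj, hz⟩
    exact ⟨_, ⟨i, hi, rfl⟩, (List.countP_pos_iff.mpr ⟨j, hj, hz⟩).ne'⟩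

-- ===== VERDICT (by name: the statement is the Claim_ definition above) =====
theorem is_generalized_tourney_spec : Claim_equal_is_generalized_tourney := by
  intro matrix _ _
  unfold Spec_is_generalized_tourney
  simp only [is_generalized_tourney, is_generalized_tourney_alt, pvAOuter_eq]
  by_cases hP : ((PySem.List.pyRange 0 (matrix.length : Int) 1).any (fun i =>
      (PySem.List.pyRange 0 ((PySem.List.pyGetD matrix 0 []).length : Int) 1).any (fun j =>
        decide (i ≠ j) && decide (pvMGet matrix i j ≠ -(pvMGet matrix j i))))) = true
  · rw [if_pos hP, if_pos hP]
    simp only [pvAFinish]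
  · rw [Bool.not_eq_true] at hP
    rw [if_neg (by rw [hP]; exact Bool.false_ne_true), if_neg (by rw [hP]; exact Bool.false_ne_true)]
    simp only [pvAFinish, zero_add]
    have hiff := pvSum_ne_zero_iff matrix
      (PySem.List.pyRange 0 ((PySem.List.pyGetD matrix 0 []).length : Int) 1)
      (PySem.List.pyRange 0 (matrix.length : Int) 1)
    by_cases hD : ((PySem.List.pyRange 0 (matrix.length : Int) 1).any (fun i =>
        (PySem.List.pyRange 0 ((PySem.List.pyGetD matrix 0 []).length : Int) 1).any (fun j =>
          decide (i ≠ j) && decide (pvMGet matrix i j = 0)))) = true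
    · rw [if_pos (by exact_mod_cast Int.natCast_ne_zero.mpr (hiff.mpr hD)), if_pos hD]
    · rw [Bool.not_eq_true] at hD
      have hz : ((PySem.List.pyRange 0 (matrix.length : Int) 1).map (fun i =>
          (PySem.List.pyRange 0 ((PySem.List.pyGetD matrix 0 []).length : Int) 1).countP
            (fun j => decide (i ≠ j) && decide (pvMGet matrix i j = 0)))).sum = 0 := by
        by_contra hc
        exact absurd (hiff.mp hc) (by rw [hD]; exact Bool.false_ne_true)
      rw [if_neg (by intro h; exact h (by exact_mod_cast hz)), if_neg (by rw [hD]; exact Bool.false_ne_true)]
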